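-- pv_equiv track=rewrite | github.com/ferbetanzo/sudoku-nisq | preprocessing.py | fix_tuples
-- ===== SOURCE A (Python) =====
-- def fix_tuples(open_tuples):
--     # Create dictionary to count occurrences of each cell position with potential digits
--     count_dict = {}
--     # Count each cell's possible digits
--     for tup in open_tuples:
--         key = (tup[0], tup[1])  # Use cell position as key
--         if key in count_dict:
--             count_dict[key].append(tup)
--         else:
--             count_dict[key] = [tup]
--     # Collect only those cell positions with a single possible digit
--     fixed_tuples = []
--     for key, value in count_dict.items():
--         if len(value) == 1:
--             fixed_tuples.extend(value)
--     return fixed_tuples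
-- ===== SOURCE B (Python) =====
-- def fix_tuples(open_tuples):
--     # Brute force, no dictionary: a tuple is fixed iff exactly one tuple in the
--     # whole list (itself) has its cell position; list order is preserved, which
--     # matches A's first-occurrence group order since count-1 keys occur once.
--     return [t for t in open_tuples
--             if sum((s[0], s[1]) == (t[0], t[1]) for s in open_tuples) == 1]
-- ===== Notes on version B (the rewrite author's own statement) =====
-- stated objective: alternative
-- what changed: B drops A's dictionary of grouped tuple lists entirely and instead decides each tuple by a direct nested scan of the whole list, keeping a tuple iff exactly one tuple shares its cell position; this trades A's O(n) dict build for an O(n^2) pairwise scan.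
import Mathlib
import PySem

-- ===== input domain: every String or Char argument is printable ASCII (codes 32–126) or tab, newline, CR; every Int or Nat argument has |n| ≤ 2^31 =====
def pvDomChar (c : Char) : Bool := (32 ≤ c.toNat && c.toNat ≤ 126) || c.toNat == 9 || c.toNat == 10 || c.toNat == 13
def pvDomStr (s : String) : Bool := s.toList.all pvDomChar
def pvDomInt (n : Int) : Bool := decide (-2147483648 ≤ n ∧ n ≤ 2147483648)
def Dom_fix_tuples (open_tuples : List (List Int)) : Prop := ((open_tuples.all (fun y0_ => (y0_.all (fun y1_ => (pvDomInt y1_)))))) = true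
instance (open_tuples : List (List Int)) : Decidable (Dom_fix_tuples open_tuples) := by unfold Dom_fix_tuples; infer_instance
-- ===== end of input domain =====

-- B drops A's dictionary of grouped lists and decides each tuple by a nested
-- scan of the whole list (alternative algorithm, O(n) dict build vs O(n^2) scan).

-- ===== PORT A =====
-- grouping dict: cell position (tup[0], tup[1]) ↦ list of tuples at it
def fix_tuples (open_tuples : List (List Int)) : List (List Int) :=
  let count_dict : PySem.Dict (Int × Int) (List (List Int)) :=
    open_tuples.foldl (fun d tup =>
      -- key = (tup[0], tup[1]); Pre_ guarantees both indices are in range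
      let key := (PySem.List.pyGetD tup 0 0, PySem.List.pyGetD tup 1 0)
      if d.contains key then d.insert key (d.getD key [] ++ [tup])
      else d.insert key [tup]) PySem.Dict.empty
  count_dict.items.foldl (fun acc kv =>
    if PySem.List.len kv.2 == 1 then acc ++ kv.2 else acc) []

-- ===== PORT B =====
-- sum((s[0], s[1]) == (t[0], t[1]) for s in open_tuples) ported as a fold of 0/1
def fix_tuples_alt (open_tuples : List (List Int)) : List (List Int) :=
  open_tuples.filter (fun t =>
    (open_tuples.foldl (fun acc s =>
      acc + (if (PySem.List.pyGetD s 0 0, PySem.List.pyGetD s 1 0)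
                  == (PySem.List.pyGetD t 0 0, PySem.List.pyGetD t 1 0)
             then (1 : Int) else 0)) 0) == 1)

-- ===== PRECONDITION & SPEC =====
-- Pre_ excludes exactly the inputs where Python raises: tup[0]/tup[1] is an
-- IndexError (in both A and B) when some tuple has fewer than 2 entries.
def Pre_fix_tuples (open_tuples : List (List Int)) : Prop :=
  ∀ tup ∈ open_tuples, 2 ≤ tup.length
instance (open_tuples : List (List Int)) : Decidable (Pre_fix_tuples open_tuples) := by
  unfold Pre_fix_tuples; infer_instance
def pvWitness_fix_tuples : List (List Int) := [[0, 0, 5], [0, 0, 7], [1, 2, 3]]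
def Spec_fix_tuples (open_tuples : List (List Int)) (out : List (List Int)) : Prop := out = fix_tuples_alt open_tuples
instance (open_tuples : List (List Int)) (out : List (List Int)) : Decidable (Spec_fix_tuples open_tuples out) := by unfold Spec_fix_tuples; infer_instance

-- ===== CLAIM (what is proved, stated in full; the proofs are below) =====
def Claim_equal_fix_tuples : Prop := ∀ (open_tuples : List (List Int)), Dom_fix_tuples open_tuples → Pre_fix_tuples open_tuples → Spec_fix_tuples open_tuples (fix_tuples open_tuples)

-- ===== LEMMAS AND PROOFS =====

-- the cell-position key both programs use
def pvKey (tup : List Int) : Int × Int :=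
  (PySem.List.pyGetD tup 0 0, PySem.List.pyGetD tup 1 0)

-- A's build step is Dict.modify with the grouping function
lemma stepA_eq_modify (d : PySem.Dict (Int × Int) (List (List Int))) (k : Int × Int)
    (t : List Int) :
    (if d.contains k then d.insert k (d.getD k [] ++ [t]) else d.insert k [t])
      = d.modify k [] (· ++ [t]) := by
  unfold PySem.Dict.modify
  split <;> simp [PySem.Dict.getD_of_not_contains, *]

-- filtering out one key commutes with flatMap of per-key groups
lemma filter_flatMap_key {α κ : Type} [BEq κ] [LawfulBEq κ] (K : α → κ)
    (Gm : κ → List α) (hG : ∀ k, ∀ s ∈ Gm k, K s = k) (k0 : κ) :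
    ∀ ks : List κ,
      (ks.filter (fun k => !(k == k0))).flatMap Gm
        = (ks.flatMap Gm).filter (fun s => !(K s == k0)) := by
  intro ks
  induction ks with
  | nil => simp
  | cons k rest ih =>
    by_cases hk : k = k0
    · have h0 : (Gm k).filter (fun s => !(K s == k0)) = [] := by
        apply List.filter_eq_nil_iff.mpr
        intro s hs
        simp [hG k s hs, hk]
      simp [List.filter_append, ih, hk]
      exact fun a ha => hG k0 a ha
    · have h1 : (Gm k).filter (fun s => !(K s == k0)) = Gm k := by
        apply List.filter_eq_self.mpr
        intro s hs
        simp [hG k s hs, hk]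
      simp [List.filter_append, h1, ih, hk]

lemma discard_eq_filter {κ : Type} [BEq κ] (s : PySem.Set κ) (x : κ) :
    PySem.Set.discard s x = s.filter (fun y => !(y == x)) := rfl

-- main lemma: emitting the size-1 groups of the first-occurrence grouping
-- equals filtering the original list by key count 1
lemma emit_groups_eq_filter {α κ : Type} [BEq κ] [LawfulBEq κ] (K : α → κ) :
    ∀ xs : List α,
      ((PySem.Set.ofList (xs.map K)).filter (fun k => (xs.map K).count k == 1)).flatMap
          (fun k => xs.filter (fun t => K t == k))
        = xs.filter (fun t => (xs.map K).count (K t) == 1) := by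
  intro xs
  induction xs with
  | nil => simp
  | cons t rest ih =>
    have hGm : ∀ k : κ, ∀ s ∈ rest.filter (fun s => K s == k), K s = k := by
      intro k s hs
      exact eq_of_beq (List.mem_filter.mp hs).2
    simp only [List.map_cons]
    rw [PySem.Set.ofList_cons, discard_eq_filter]
    by_cases h : K t ∈ rest.map K
    · -- the key of t occurs again: both sides drop all tuples with this key
      have hc : 0 < (rest.map K).count (K t) := List.count_pos_iff.mpr h
      have hP : (((K t :: rest.map K).count (K t)) == 1) = false := by
        simp only [List.count_cons, beq_self_eq_true, if_true]
        simp only [beq_eq_false_iff_ne]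
        omega
      rw [List.filter_cons_of_neg (by simp only [hP]; exact Bool.false_ne_true)]
      -- on keys ≠ K t the count over (K t :: m) is the count over m
      have hcongr : ((PySem.Set.ofList (rest.map K)).filter (fun y => !(y == K t))).filter
            (fun k => (K t :: rest.map K).count k == 1)
          = ((PySem.Set.ofList (rest.map K)).filter (fun k => (rest.map K).count k == 1)).filter
            (fun y => !(y == K t)) := by
        rw [List.filter_filter, List.filter_filter]
        apply List.filter_congr
        intro k _
        by_cases hk : k = K t
        · subst hk
          simp only [beq_self_eq_true, Bool.not_true, Bool.and_false, Bool.false_and]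
        · have hkb : (K t == k) = false := by
            rw [beq_eq_false_iff_ne]; exact fun e => hk e.symm
          simp [List.count_cons, hkb, Bool.and_comm]
      rw [hcongr]
      have hG : ∀ k ∈ ((PySem.Set.ofList (rest.map K)).filter
            (fun k => (rest.map K).count k == 1)).filter (fun y => !(y == K t)),
          (t :: rest).filter (fun s => K s == k) = rest.filter (fun s => K s == k) := by
        intro k hk
        have hne : ¬(K t == k) = true := by
          have := (List.mem_filter.mp hk).2
          simp only [Bool.not_eq_eq_eq_not, Bool.not_true, beq_eq_false_iff_ne] at this
          simp [beq_iff_eq]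
          exact fun e => this e.symm
        rw [List.filter_cons_of_neg (by simpa using hne)]
      rw [List.flatMap_congr hG]
      rw [filter_flatMap_key K (fun k => rest.filter (fun s => K s == k)) hGm (K t)]
      rw [ih]
      rw [List.filter_filter]
      -- right-hand side: t is dropped, and keys equal to K t fail on both sides
      rw [List.filter_cons_of_neg (by simp only [hP]; exact Bool.false_ne_true)]
      apply List.filter_congr
      intro s _
      by_cases hs : K s = K t
      · rw [hs]
        simp
        omega
      · have h1 : (K s == K t) = false := by rw [beq_eq_false_iff_ne]; exact hs
        have h2 : (K t == K s) = false := by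
          rw [beq_eq_false_iff_ne]; exact fun e => hs e.symm
        simp [List.count_cons, h1, h2]
    · -- the key of t is unique so far: t is kept by both sides
      have hc0 : (rest.map K).count (K t) = 0 := List.count_eq_zero.mpr h
      have hP : (((K t :: rest.map K).count (K t)) == 1) = true := by
        simp [hc0]
      have hfil : (PySem.Set.ofList (rest.map K)).filter (fun y => !(y == K t))
          = PySem.Set.ofList (rest.map K) := by
        apply List.filter_eq_self.mpr
        intro y hy
        have : y ∈ rest.map K := (PySem.List.mem_dedup _ _).mp hy
        simp only [Bool.not_eq_eq_eq_not, Bool.not_true, beq_eq_false_iff_ne]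
        exact fun e => h (e ▸ this)
      rw [hfil, List.filter_cons_of_pos (by simpa using hP)]
      rw [List.flatMap_cons]
      have hGt : (t :: rest).filter (fun s => K s == K t) = [t] := by
        rw [List.filter_cons_of_pos (by simp)]
        have : rest.filter (fun s => K s == K t) = [] := by
          apply List.filter_eq_nil_iff.mpr
          intro s hs
          simp only [beq_iff_eq]
          exact fun e => h (e ▸ List.mem_map_of_mem hs)
        rw [this]
      rw [hGt]
      have hcongr : (PySem.Set.ofList (rest.map K)).filter
            (fun k => (K t :: rest.map K).count k == 1)
          = (PySem.Set.ofList (rest.map K)).filter (fun k => (rest.map K).count k == 1) := by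
        apply List.filter_congr
        intro k hk
        have hkm : k ∈ rest.map K := (PySem.List.mem_dedup _ _).mp hk
        have hne : (K t == k) = false := by
          rw [beq_eq_false_iff_ne]; exact fun e => h (e ▸ (e ▸ hkm))
        simp [List.count_cons, hne]
      rw [hcongr]
      have hG : ∀ k ∈ (PySem.Set.ofList (rest.map K)).filter
            (fun k => (rest.map K).count k == 1),
          (t :: rest).filter (fun s => K s == k) = rest.filter (fun s => K s == k) := by
        intro k hk
        have hkm : k ∈ rest.map K := (PySem.List.mem_dedup _ _).mp (List.mem_filter.mp hk).1
        have hne : K t ≠ k := fun e => h (e ▸ hkm)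
        rw [List.filter_cons_of_neg (by simpa using hne)]
      rw [List.flatMap_congr hG, ih]
      rw [List.filter_cons_of_pos (by simpa using hP)]
      rw [List.singleton_append]
      congr 1
      apply List.filter_congr
      intro s hs
      by_cases hseq : K s = K t
      · exact absurd (hseq ▸ List.mem_map_of_mem hs) h
      · have h2 : (K t == K s) = false := by
          rw [beq_eq_false_iff_ne]; exact fun e => hseq e.symm
        simp [List.count_cons, h2]

-- Nat-count == 1 over Int vs over Nat
lemma cast_beq_one (c : Nat) : ((c : Int) == (1 : Int)) = (c == 1) := by
  by_cases h : c = 1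
  · simp [h]
  · have h2 : (c : Int) ≠ 1 := by exact_mod_cast h
    simp [h]

-- the size of a key's group is that key's count
lemma length_filter_key (xs : List (List Int)) (k : Int × Int) :
    (xs.filter (fun t => pvKey t == k)).length = (xs.map pvKey).count k := by
  rw [List.count_eq_countP, List.countP_map]
  exact Eq.symm List.countP_eq_length_filter

-- closed form of A's result
lemma fix_tuples_closed (xs : List (List Int)) :
    fix_tuples xs
      = ((PySem.Set.ofList (xs.map pvKey)).filter (fun k => (xs.map pvKey).count k == 1)).flatMap
          (fun k => xs.filter (fun t => pvKey t == k)) := by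
  -- name A's grouping dict, with its step rewritten as Dict.modify
  have hstep : fix_tuples xs
      = (xs.foldl (fun d tup => d.modify (pvKey tup) [] (· ++ [tup]))
          (PySem.Dict.empty : PySem.Dict (Int × Int) (List (List Int)))).items.foldl
          (fun acc kv => if PySem.List.len kv.2 == 1 then acc ++ kv.2 else acc) [] := by
    have hfold : (xs.foldl (fun d tup =>
        if d.contains (pvKey tup) then d.insert (pvKey tup) (d.getD (pvKey tup) [] ++ [tup])
        else d.insert (pvKey tup) [tup])
        (PySem.Dict.empty : PySem.Dict (Int × Int) (List (List Int))))
        = xs.foldl (fun d tup => d.modify (pvKey tup) [] (· ++ [tup])) PySem.Dict.empty :=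
      PySem.List.foldl_congr_mem _ _ _ _ (fun d tup _ => stepA_eq_modify d (pvKey tup) tup)
    show ((xs.foldl (fun d tup =>
        if d.contains (pvKey tup) then d.insert (pvKey tup) (d.getD (pvKey tup) [] ++ [tup])
        else d.insert (pvKey tup) [tup])
        (PySem.Dict.empty : PySem.Dict (Int × Int) (List (List Int)))).items.foldl
        (fun acc kv => if PySem.List.len kv.2 == 1 then acc ++ kv.2 else acc) []) = _
    rw [hfold]
  rw [hstep]
  set cd := xs.foldl (fun d tup => d.modify (pvKey tup) [] (· ++ [tup]))
      (PySem.Dict.empty : PySem.Dict (Int × Int) (List (List Int))) with hcd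
  have hnd : cd.keys.Nodup := by
    rw [hcd]
    exact PySem.Dict.nodup_keys_foldl_modify_key xs pvKey [] (fun _ tup => (· ++ [tup]))
      PySem.Dict.empty (by simp)
  have hkeys : cd.keys = PySem.Set.ofList (xs.map pvKey) := by
    rw [hcd, PySem.Dict.keys_foldl_modify_key]
    simp [PySem.Dict.keys_empty, PySem.Set.update_nil_left]
  have hgetD : ∀ k, cd.getD k [] = xs.filter (fun t => pvKey t == k) := by
    intro k
    have hmap : xs.foldl (fun d tup => d.modify (pvKey tup) [] (· ++ [tup]))
        (PySem.Dict.empty : PySem.Dict (Int × Int) (List (List Int)))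
        = (xs.map (fun tup => (pvKey tup, tup))).foldl
            (fun d p => d.modify p.1 [] (· ++ [p.2])) PySem.Dict.empty := by
      rw [List.foldl_map]
    rw [hcd, hmap, PySem.Dict.getD_foldl_modify_append]
    rw [List.filter_map]
    simp [PySem.Dict.getD_empty, Function.comp_def, List.map_map]
  rw [PySem.List.foldl_if_eq_foldl_filter, PySem.List.foldl_append_eq_flatMap]
  rw [PySem.Dict.items_eq_map_keys cd hnd []]
  rw [List.filter_map, List.flatMap_map]
  simp only [Function.comp_def, hgetD, hkeys, PySem.List.len_eq, length_filter_key, cast_beq_one]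
  simp only [List.nil_append]

-- B's inner fold sums 0/1 indicators: it equals the key count
lemma foldl_indicator_count (k : Int × Int) :
    ∀ (xs : List (List Int)) (acc : Int),
      xs.foldl (fun acc s => acc + (if pvKey s == k then (1 : Int) else 0)) acc
        = acc + ((xs.map pvKey).count k : Int) := by
  intro xs
  induction xs with
  | nil => intro acc; simp
  | cons s rest ih =>
    intro acc
    simp only [List.foldl_cons, List.map_cons, List.count_cons, ih]
    by_cases h : pvKey s = k
    · simp [h]; ring
    · have h2 : (k == pvKey s) = false := by
        rw [beq_eq_false_iff_ne]; exact fun e => h e.symm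
      simp [h]

-- closed form of B's result
lemma fix_tuples_alt_closed (xs : List (List Int)) :
    fix_tuples_alt xs = xs.filter (fun t => (xs.map pvKey).count (pvKey t) == 1) := by
  show xs.filter (fun t =>
      (xs.foldl (fun acc s => acc + (if pvKey s == pvKey t then (1 : Int) else 0)) 0) == 1) = _
  apply List.filter_congr
  intro t _
  rw [foldl_indicator_count, Int.zero_add, cast_beq_one]

-- ===== VERDICT (by name: the statement is the Claim_ definition above) =====
theorem fix_tuples_spec : Claim_equal_fix_tuples := by
  intro xs _ _
  unfold Spec_fix_tuples
  rw [fix_tuples_closed, fix_tuples_alt_closed, emit_groups_eq_filter]
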